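-- pv_equiv track=rewrite | github.com/KKosukeee/CodingQuestions | LeetCode/791_custom_sort_string.py | counter_solution
-- ===== SOURCE A (Python) =====
-- from collections import Counter
--
-- def counter_solution(S: str, T: str) -> str:
--   """
--   A solution that uses counter that runs in O(M+N) in time and O(1) in space
--
--   Args:
--     S:
--     T:
--
--   Returns:
--
--   """
--   counter = Counter(T)
--   ans = []
--   for char in S:
--     ans.append(char * counter[char])
--     counter[char] = 0
--   for char in counter:
--     ans.append(char * counter[char])
--   return ''.join(ans)
-- ===== SOURCE B (Python) =====
-- def counter_solution(S: str, T: str) -> str: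
--   """Custom sort via sort-by-rank: rank chars by first appearance in S, then in T, and stably sort T."""
--   rank = {}
--   for c in S:
--     if c not in rank:
--       rank[c] = len(rank)
--   for c in T:
--     if c not in rank:
--       rank[c] = len(rank)
--   return ''.join(sorted(T, key=lambda c: rank[c]))
-- ===== Notes on version B (the rewrite author's own statement) =====
-- stated objective: alternative
-- what changed: A counts T and concatenates per-character runs (zeroing Counter entries over S, then sweeping leftover keys); B instead builds a rank key (first-appearance order in S, then T) and returns T stably sorted by that key - a comparison sort instead of counting/concatenation.
import Mathlib
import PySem

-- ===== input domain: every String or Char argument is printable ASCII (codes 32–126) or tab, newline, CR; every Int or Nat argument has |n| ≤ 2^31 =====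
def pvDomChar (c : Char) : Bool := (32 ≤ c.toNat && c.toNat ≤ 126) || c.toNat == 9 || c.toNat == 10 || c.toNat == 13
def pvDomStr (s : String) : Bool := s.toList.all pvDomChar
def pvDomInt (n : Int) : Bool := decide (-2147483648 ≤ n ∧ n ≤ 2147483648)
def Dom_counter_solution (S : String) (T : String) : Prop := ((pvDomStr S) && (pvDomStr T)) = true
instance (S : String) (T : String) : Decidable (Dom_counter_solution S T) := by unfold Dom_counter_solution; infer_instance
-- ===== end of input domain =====

-- B replaces A's counting-and-concatenation (Counter(T), zeroing entries while scanning S,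
-- then sweeping leftover keys) by a rank-keyed stable sort of T; objective: alternative.

-- ===== PORT A =====
def counter_solution (S : String) (T : String) : String :=
  -- counter = Counter(T)
  let counter := PySem.Dict.counter T.toList
  -- for char in S: ans.append(char * counter[char]); counter[char] = 0
  let st := S.toList.foldl
    (fun (st : List (List Char) × PySem.Dict Char Int) c =>
      (st.1 ++ [PySem.List.pyRepeat [c] (st.2.getD c 0)], st.2.insert c 0))
    ([], counter)
  -- for char in counter: ans.append(char * counter[char])
  let ans := st.2.keys.foldl (fun a c => a ++ [PySem.List.pyRepeat [c] (st.2.getD c 0)]) st.1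
  -- return ''.join(ans)
  String.mk (PySem.Chars.join [] ans)

-- ===== PORT B =====
-- if c not in rank: rank[c] = len(rank)
def pvRankStep (d : PySem.Dict Char Int) (c : Char) : PySem.Dict Char Int :=
  if d.contains c then d else d.insert c (PySem.Dict.size d : Int)

def counter_solution_alt (S : String) (T : String) : String :=
  -- rank = {}; for c in S: if c not in rank: rank[c] = len(rank)
  let rank0 := S.toList.foldl pvRankStep PySem.Dict.empty
  -- for c in T: if c not in rank: rank[c] = len(rank)
  let rank := T.toList.foldl pvRankStep rank0
  -- ''.join(sorted(T, key=lambda c: rank[c]))  — every char of T is a key of rank, so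
  -- rank[c] never raises and equals rank.getD c 0; joining 1-char strings is String.mk
  String.mk (PySem.List.sorted T.toList (fun c => rank.getD c 0) false)

-- ===== PRECONDITION & SPEC =====
def Spec_counter_solution (S : String) (T : String) (out : String) : Prop := out = counter_solution_alt S T
instance (S : String) (T : String) (out : String) : Decidable (Spec_counter_solution S T out) := by unfold Spec_counter_solution; infer_instance

-- ===== CLAIM (what is proved, stated in full; the proofs are below) =====
def Claim_equal_counter_solution : Prop := ∀ (S : String) (T : String), Dom_counter_solution S T → Spec_counter_solution S T (counter_solution S T)

-- ===== LEMMAS AND PROOFS =====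

-- the common normal form: distinct chars of S then of T, each repeated its count in T
def pvL (S T : String) : List Char := PySem.Set.ofList (S.toList ++ T.toList)

def pvGroups (S T : String) : List (List Char) :=
  (pvL S T).map (fun c => List.replicate (T.toList.count c) c)

-- ''.join(parts) is flatten
theorem pv_join_nil_flatten (l : List (List Char)) : PySem.Chars.join [] l = l.flatten := by
  show ([] : List Char).intercalate l = l.flatten
  unfold List.intercalate
  induction l with
  | nil => simp
  | cons x xs ih =>
    cases xs with
    | nil => simp
    | cons y ys => simpa using congrArg (x ++ ·) ih

-- set.update appends exactly the deduped new elements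
theorem pv_update_eq_append_filter (l : List Char) (A : PySem.Set Char) :
    PySem.Set.update A l = A ++ (PySem.Set.ofList l).filter (fun x => !decide (x ∈ A)) := by
  induction l generalizing A with
  | nil => simp [PySem.Set.update, PySem.Set.ofList]
  | cons c cs ih =>
    have hof : PySem.Set.ofList (c :: cs) = PySem.Set.update [c] cs := by
      simp [PySem.Set.ofList, PySem.Set.update, PySem.Set.add, PySem.Set.contains,
        PySem.Set.empty]
    have hup : PySem.Set.update A (c :: cs) = PySem.Set.update (PySem.Set.add A c) cs := by
      simp [PySem.Set.update]
    rw [hup, ih, hof, ih]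
    simp only [List.filter_append, List.filter_filter]
    by_cases hc : c ∈ A
    · have hadd : PySem.Set.add A c = A := by
        simp [PySem.Set.add, hc]
      rw [hadd]
      congr 1
      have h1 : List.filter (fun x => !decide (x ∈ A)) [c] = [] := by
        simp [List.filter, hc]
      rw [h1, List.nil_append]
      apply List.filter_congr
      intro x _
      by_cases hx : x = c
      · subst hx; simp [hc]
      · simp [hx]
    · have hadd : PySem.Set.add A c = A ++ [c] := by
        simp [PySem.Set.add, hc]
      rw [hadd]
      have h1 : List.filter (fun x => !decide (x ∈ A)) [c] = [c] := by
        simp [List.filter, hc]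
      rw [h1, List.append_assoc]
      congr 2
      apply List.filter_congr
      intro x _
      by_cases hx : x = c
      · subst hx; simp [hc]
      · simp [hx]

theorem pv_ofList_append (s t : List Char) :
    PySem.Set.ofList (s ++ t) = PySem.Set.update (PySem.Set.ofList s) t := by
  simp [PySem.Set.ofList, PySem.Set.update, List.foldl_append]

-- zeroing loop: lookup afterwards
theorem pv_getD_foldl_insert_zero (s : List Char) (d : PySem.Dict Char Int) (c : Char) :
    (s.foldl (fun d c => d.insert c (0:Int)) d).getD c 0
      = if c ∈ s then 0 else d.getD c 0 := by
  induction s generalizing d with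
  | nil => simp
  | cons a as ih =>
    simp only [List.foldl_cons, ih, PySem.Dict.getD_insert, List.mem_cons]
    by_cases h1 : c ∈ as <;> by_cases h2 : c = a <;> simp [h1, h2]

-- what A's first loop appends, as a function of the set Z of already-zeroed chars
def pvContrib (t : List Char) : PySem.Set Char → List Char → List (List Char)
  | _, [] => []
  | Z, c :: cs =>
    (if c ∈ Z then [] else List.replicate (t.count c) c) :: pvContrib t (PySem.Set.add Z c) cs

theorem pv_loop1 (t : List Char) (s : List Char) :
    ∀ (ans : List (List Char)) (d : PySem.Dict Char Int) (Z : PySem.Set Char),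
    (∀ c, d.getD c 0 = if c ∈ Z then 0 else (t.count c : Int)) →
    s.foldl (fun (st : List (List Char) × PySem.Dict Char Int) c =>
        (st.1 ++ [PySem.List.pyRepeat [c] (st.2.getD c 0)], st.2.insert c 0)) (ans, d)
      = (ans ++ pvContrib t Z s, s.foldl (fun d c => d.insert c (0:Int)) d) := by
  induction s with
  | nil => intro ans d Z _; simp [pvContrib]
  | cons c cs ih =>
    intro ans d Z h
    have hd : ∀ x, (d.insert c (0:Int)).getD x 0
        = if x ∈ PySem.Set.add Z c then 0 else (t.count x : Int) := by
      intro x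
      rw [PySem.Dict.getD_insert]
      by_cases hx : x = c
      · simp [hx, PySem.Set.mem_add]
      · simp only [hx, if_false, h x, PySem.Set.mem_add]
        by_cases hz : x ∈ Z <;> simp [hz]
    have hval : PySem.List.pyRepeat [c] (d.getD c 0)
        = (if c ∈ Z then [] else List.replicate (t.count c) c) := by
      rw [PySem.List.pyRepeat_singleton, h c]
      by_cases hz : c ∈ Z <;> simp [hz]
    simp only [List.foldl_cons, hval]
    rw [ih (ans ++ [if c ∈ Z then [] else List.replicate (t.count c) c]) _ _ hd]
    simp [pvContrib]

-- flattening A's first-loop output: each distinct char of s not yet zeroed, in first-appearance order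
theorem pv_flatten_contrib (t : List Char) (s : List Char) :
    ∀ Z : PySem.Set Char,
    (pvContrib t Z s).flatten
      = (((PySem.Set.ofList s).filter (fun x => !decide (x ∈ Z))).map
          (fun c => List.replicate (t.count c) c)).flatten := by
  induction s with
  | nil => intro Z; simp [pvContrib, PySem.Set.ofList, PySem.Set.empty]
  | cons c cs ih =>
    intro Z
    have hof : PySem.Set.ofList (c :: cs)
        = [c] ++ (PySem.Set.ofList cs).filter (fun x => !decide (x ∈ ([c] : List Char))) := by
      have h2 : PySem.Set.ofList (c :: cs) = PySem.Set.update [c] cs := by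
        simp [PySem.Set.ofList, PySem.Set.update, PySem.Set.add, PySem.Set.contains,
          PySem.Set.empty]
      rw [h2, pv_update_eq_append_filter]
    rw [hof]
    simp only [pvContrib, List.flatten_cons, ih (PySem.Set.add Z c),
      List.filter_append, List.map_append, List.flatten_append, List.filter_filter]
    by_cases hz : c ∈ Z
    · have h1 : List.filter (fun x => !decide (x ∈ Z)) [c] = [] := by
        simp [List.filter, hz]
      rw [h1]
      simp only [hz, if_true, List.map_nil, List.flatten_nil, List.nil_append]
      refine congrArg List.flatten (congrArg (List.map _) (List.filter_congr ?_))
      intro x _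
      by_cases hx : x = c
      · subst hx; simp [hz]
      · simp [hx, PySem.Set.mem_add]
    · have h1 : List.filter (fun x => !decide (x ∈ Z)) [c] = [c] := by
        simp [List.filter, hz]
      rw [h1]
      simp only [hz, if_false, List.map_cons, List.map_nil, List.flatten_cons,
        List.flatten_nil, List.append_nil]
      congr 1
      refine congrArg List.flatten (congrArg (List.map _) (List.filter_congr ?_))
      intro x _
      by_cases hx : x = c
      · subst hx; simp [PySem.Set.mem_add]
      · simp [hx, PySem.Set.mem_add]

-- products of ifs flatten to a filtered map
theorem pv_flatten_map_ite (l : List Char) (p : Char → Prop) [DecidablePred p]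
    (g : Char → List Char) :
    (l.map (fun c => if p c then [] else g c)).flatten
      = ((l.filter (fun c => !decide (p c))).map g).flatten := by
  induction l with
  | nil => simp
  | cons a as ih =>
    by_cases h : p a <;> simp [h, ih]

-- pvL splits into the distinct chars of S and the distinct leftover chars of T
theorem pv_pvL_split (S T : String) :
    pvL S T = PySem.Set.ofList S.toList
      ++ (PySem.Set.ofList T.toList).filter (fun c => !decide (c ∈ S.toList)) := by
  rw [pvL, pv_ofList_append, pv_update_eq_append_filter]
  congr 1
  apply List.filter_congr
  intro x _
  simp [PySem.Set.mem_ofList]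

-- A produces exactly the flattened groups
theorem pv_A_eq_groups (S T : String) :
    counter_solution S T = String.mk (pvGroups S T).flatten := by
  simp only [counter_solution]
  have hinv : ∀ c : Char, (PySem.Dict.counter T.toList).getD c 0
      = if c ∈ ([] : PySem.Set Char) then 0 else (T.toList.count c : Int) := by
    intro c; simp [PySem.Dict.getD_counter]
  rw [pv_loop1 T.toList S.toList [] (PySem.Dict.counter T.toList) [] hinv]
  simp only [List.nil_append]
  rw [PySem.List.foldl_append_singleton_eq_map, pv_join_nil_flatten]
  congr 1
  set D2 := S.toList.foldl (fun d c => d.insert c (0:Int)) (PySem.Dict.counter T.toList) with hD2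
  have hkeys : D2.keys = PySem.Set.update (PySem.Set.ofList T.toList) S.toList := by
    rw [hD2, PySem.Dict.keys_foldl_insert (f := fun _ _ => (0:Int)), PySem.Dict.keys_counter]
  have hmap : D2.keys.map (fun c => PySem.List.pyRepeat [c] (D2.getD c 0))
      = D2.keys.map (fun c => if c ∈ S.toList then [] else List.replicate (T.toList.count c) c) := by
    apply List.map_congr_left
    intro c _
    rw [PySem.List.pyRepeat_singleton, hD2, pv_getD_foldl_insert_zero,
      PySem.Dict.getD_counter]
    by_cases h : c ∈ S.toList <;> simp [h]
  rw [List.flatten_append, hmap, pv_flatten_contrib, pv_flatten_map_ite, hkeys,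
    pv_update_eq_append_filter]
  rw [pvGroups, pv_pvL_split, List.map_append, List.flatten_append]
  congr 1
  · -- first groups: the distinct chars of S, none yet zeroed
    congr 2
    simp
  · -- leftover groups: the distinct chars of T not in S
    rw [List.filter_append]
    have h1 : ((PySem.Set.ofList S.toList).filter
        (fun x => !decide (x ∈ PySem.Set.ofList T.toList))).filter
        (fun c => !decide (c ∈ S.toList)) = [] := by
      rw [List.filter_eq_nil_iff]
      intro x hx
      have hxs : x ∈ S.toList := (PySem.Set.mem_ofList _ _).mp (List.mem_of_mem_filter hx)
      simp [hxs]
    rw [h1]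
    simp

-- the rank fold keeps the invariant: keys are the distinct chars seen so far,
-- each mapped to its position among the keys
theorem pv_rank_fold (xs : List Char) (d : PySem.Dict Char Int)
    (hnd : d.keys.Nodup)
    (hval : ∀ c ∈ d.keys, d.getD c 0 = (d.keys.idxOf c : Int)) :
    (xs.foldl pvRankStep d).keys = PySem.Set.update d.keys xs
    ∧ (xs.foldl pvRankStep d).keys.Nodup
    ∧ (∀ c ∈ (xs.foldl pvRankStep d).keys,
        (xs.foldl pvRankStep d).getD c 0 = ((xs.foldl pvRankStep d).keys.idxOf c : Int)) := by
  induction xs generalizing d with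
  | nil => exact ⟨rfl, hnd, hval⟩
  | cons c cs ih =>
    simp only [List.foldl_cons]
    have hup : PySem.Set.update d.keys (c :: cs) = PySem.Set.update (PySem.Set.add d.keys c) cs := by
      simp [PySem.Set.update]
    by_cases hc : d.contains c = true
    · have hstep : pvRankStep d c = d := by simp [pvRankStep, hc]
      have hmem : c ∈ d.keys := (PySem.Dict.contains_iff_mem_keys d c).mp hc
      have hadd : PySem.Set.add d.keys c = d.keys := by simp [PySem.Set.add, hmem]
      rw [hstep, hup, hadd]
      exact ih d hnd hval
    · have hstep : pvRankStep d c = d.insert c (PySem.Dict.size d : Int) := by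
        simp [pvRankStep, hc]
      have hnmem : c ∉ d.keys := fun h =>
        hc ((PySem.Dict.contains_iff_mem_keys d c).mpr h)
      have hkeys : (d.insert c (PySem.Dict.size d : Int)).keys = d.keys ++ [c] :=
        PySem.Dict.keys_insert_of_not_contains d _ (by simpa using hc)
      have hadd : PySem.Set.add d.keys c = d.keys ++ [c] := by simp [PySem.Set.add, hnmem]
      have hnd' : (d.insert c (PySem.Dict.size d : Int)).keys.Nodup := by
        rw [hkeys]
        simpa [List.nodup_append] using ⟨hnd, fun a ha h => hnmem (h ▸ ha)⟩
      have hsize : (PySem.Dict.size d : Int) = (d.keys.length : Int) := by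
        simp [PySem.Dict.size, PySem.Dict.keys]
      have hval' : ∀ x ∈ (d.insert c (PySem.Dict.size d : Int)).keys,
          (d.insert c (PySem.Dict.size d : Int)).getD x 0
            = ((d.insert c (PySem.Dict.size d : Int)).keys.idxOf x : Int) := by
        intro x hx
        rw [hkeys] at hx ⊢
        rw [PySem.Dict.getD_insert]
        rcases List.mem_append.mp hx with hx1 | hx2
        · have hxc : x ≠ c := fun h => hnmem (h ▸ hx1)
          rw [if_neg hxc, List.idxOf_append_of_mem hx1]
          exact hval x hx1
        · have hxc : x = c := by simpa using hx2
          subst hxc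
          rw [if_pos rfl, List.idxOf_append_of_notMem hnmem]
          simp [hsize]
      rw [hstep, hup, hadd, ← hkeys]
      exact ih _ hnd' hval'

-- the finished rank dict: keys are pvL, value = position in pvL
theorem pv_rank_spec (S T : String) :
    ∀ c ∈ pvL S T,
      (T.toList.foldl pvRankStep (S.toList.foldl pvRankStep PySem.Dict.empty)).getD c 0
        = ((pvL S T).idxOf c : Int) := by
  have hempty_keys : (PySem.Dict.empty : PySem.Dict Char Int).keys = [] := by
    simp [PySem.Dict.empty, PySem.Dict.keys]
  have h1 := pv_rank_fold S.toList (PySem.Dict.empty : PySem.Dict Char Int)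
    (by rw [hempty_keys]; exact List.nodup_nil) (by rw [hempty_keys]; intro c hc; cases hc)
  have h2 := pv_rank_fold T.toList _ h1.2.1 h1.2.2
  have hkeys : (T.toList.foldl pvRankStep (S.toList.foldl pvRankStep PySem.Dict.empty)).keys
      = pvL S T := by
    rw [h2.1, h1.1, hempty_keys, pvL, pv_ofList_append]
    rfl
  intro c hc
  rw [h2.2.2 c (by rw [hkeys]; exact hc), hkeys]

-- count of a char in the flattened groups
theorem pv_count_flatten_groups (t : List Char) (L : List Char) (hnd : L.Nodup) (x : Char) :
    ((L.map (fun c => List.replicate (t.count c) c)).flatten).count x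
      = if x ∈ L then t.count x else 0 := by
  induction L with
  | nil => simp
  | cons a as ih =>
    have hnd' := (List.nodup_cons.mp hnd).2
    simp only [List.map_cons, List.flatten_cons, List.count_append, ih hnd', List.mem_cons]
    by_cases hxa : x = a
    · subst hxa
      have hnx : x ∉ as := (List.nodup_cons.mp hnd).1
      simp [hnx]
    · simp [List.count_replicate, hxa, Ne.symm hxa]

-- every char of T appears in pvL
theorem pv_mem_pvL_of_mem_T (S T : String) (c : Char) (h : c ∈ T.toList) : c ∈ pvL S T := by
  rw [pvL, PySem.Set.mem_ofList]
  exact List.mem_append.mpr (Or.inr h)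

-- idxOf is strictly increasing along a nodup list
theorem pv_pairwise_idxOf_lt (L : List Char) (hnd : L.Nodup) :
    L.Pairwise (fun a b => L.idxOf a < L.idxOf b) := by
  rw [List.pairwise_iff_getElem]
  intro i j hi hj hij
  rw [List.Nodup.idxOf_getElem hnd i hi, List.Nodup.idxOf_getElem hnd j hj]
  exact hij

-- the flattened groups are a permutation of T
theorem pv_groups_perm (S T : String) : (pvGroups S T).flatten.Perm T.toList := by
  rw [List.perm_iff_count]
  intro x
  have hnd : (pvL S T).Nodup := by
    rw [pvL]; exact PySem.Set.nodup_ofList _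
  rw [pvGroups, pv_count_flatten_groups _ _ hnd]
  by_cases hx : x ∈ pvL S T
  · simp [hx]
  · have hxt : x ∉ T.toList := fun h => hx (pv_mem_pvL_of_mem_T S T x h)
    simp [hx, List.count_eq_zero_of_not_mem hxt]

-- B's sorted output equals the flattened groups
theorem pv_B_eq_groups (S T : String) :
    counter_solution_alt S T = String.mk (pvGroups S T).flatten := by
  simp only [counter_solution_alt]
  congr 1
  set key : Char → Int := fun c =>
    (T.toList.foldl pvRankStep (S.toList.foldl pvRankStep PySem.Dict.empty)).getD c 0 with hkey
  have hnd : (pvL S T).Nodup := by rw [pvL]; exact PySem.Set.nodup_ofList _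
  have hkeyval : ∀ c ∈ pvL S T, key c = ((pvL S T).idxOf c : Int) := pv_rank_spec S T
  -- members of the flattened groups lie in pvL
  have hmemg : ∀ x ∈ (pvGroups S T).flatten, x ∈ pvL S T := by
    intro x hx
    rcases List.mem_flatten.mp hx with ⟨l, hl, hxl⟩
    rcases List.mem_map.mp hl with ⟨c, hc, rfl⟩
    rwa [List.eq_of_mem_replicate hxl]
  -- antisymmetry of the key order on pvL
  have hanti : ∀ a b, a ∈ pvL S T → b ∈ pvL S T → key a ≤ key b → key b ≤ key a → a = b := by
    intro a b ha hb h1 h2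
    have hab : key a = key b := le_antisymm h1 h2
    rw [hkeyval a ha, hkeyval b hb] at hab
    have hidx : (pvL S T).idxOf a = (pvL S T).idxOf b := by exact_mod_cast hab
    have hga := List.getElem_idxOf (List.idxOf_lt_length_of_mem ha)
    have hgb := List.getElem_idxOf (List.idxOf_lt_length_of_mem hb)
    rw [← hga, ← hgb]
    congr 1
  -- the sorted list is pairwise ≤ on keys
  have hs1 : (PySem.List.sorted T.toList key false).Pairwise (fun a b => key a ≤ key b) :=
    PySem.List.sorted_pairwise T.toList key
  -- the flattened groups are pairwise ≤ on keys
  have hs2 : (pvGroups S T).flatten.Pairwise (fun a b => key a ≤ key b) := by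
    rw [List.pairwise_flatten]
    constructor
    · intro l hl
      rcases List.mem_map.mp hl with ⟨c, hc, rfl⟩
      exact List.pairwise_replicate.mpr (Or.inr (le_refl _))
    · rw [pvGroups, List.pairwise_map]
      have hplt := pv_pairwise_idxOf_lt (pvL S T) hnd
      refine (List.Pairwise.and_mem.mp hplt).imp ?_
      rintro a b ⟨ha, hb, hab⟩ x hxa y hyb
      rw [List.eq_of_mem_replicate hxa, List.eq_of_mem_replicate hyb,
        hkeyval a ha, hkeyval b hb]
      exact_mod_cast le_of_lt hab
  -- both are permutations of T, so they coincide
  have hperm : (PySem.List.sorted T.toList key false).Perm (pvGroups S T).flatten :=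
    (PySem.List.sorted_perm T.toList key false).trans (pv_groups_perm S T).symm
  refine List.Perm.eq_of_pairwise ?_ hs1 hs2 hperm
  intro a b ha hb h1 h2
  have ha' : a ∈ pvL S T := by
    have : a ∈ T.toList := (PySem.List.mem_sorted _ _ _ _).mp ha
    exact pv_mem_pvL_of_mem_T S T a this
  exact hanti a b ha' (hmemg b hb) h1 h2

-- ===== VERDICT (by name: the statement is the Claim_ definition above) =====
theorem counter_solution_spec : Claim_equal_counter_solution := by
  intro S T _
  show counter_solution S T = counter_solution_alt S T
  rw [pv_A_eq_groups, pv_B_eq_groups]
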